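-- pv_equiv track=rewrite | github.com/offsuijn/Algorithm | src/programmers/모의고사.py | solution
-- ===== SOURCE A (Python) =====
-- def solution(answers):
--     answer = []
--     cnt = [0] * 3
--
--     supo1 = [1, 2, 3, 4, 5]
--     supo2 = [2, 1, 2, 3, 2, 4, 2, 5]
--     supo3 = [3, 3, 1, 1, 2, 2, 4, 4, 5, 5]
--
--     for idx, ans in enumerate(answers):
--         if ans == supo1[idx % len(supo1)]:
--             cnt[0] += 1
--         if ans == supo2[idx % len(supo2)]:
--             cnt[1] += 1
--         if ans == supo3[idx % len(supo3)]:
--             cnt[2] += 1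
--
--     for idx, val in enumerate(cnt):
--         if val == max(cnt):
--             answer.append(idx+1)
--
--     return answer
-- ===== SOURCE B (Python) =====
-- def solution(answers):
--     # Frequency table keyed by (position mod 40, value); 40 = lcm(5, 8, 10),
--     # so a position's residue mod 40 determines every supervisor's guess there.
--     freq = {}
--     for i, a in enumerate(answers):
--         key = (i % 40, a)
--         freq[key] = freq.get(key, 0) + 1
--     patterns = [
--         [1, 2, 3, 4, 5],
--         [2, 1, 2, 3, 2, 4, 2, 5],
--         [3, 3, 1, 1, 2, 2, 4, 4, 5, 5],
--     ]
--     cnt = [sum(freq.get((r, p[r % len(p)]), 0) for r in range(40))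
--            for p in patterns]
--     m = max(cnt)
--     return [i + 1 for i, v in enumerate(cnt) if v == m]
-- ===== Notes on version B (the rewrite author's own statement) =====
-- stated objective: alternative
-- what changed: A's single interleaved pass comparing each answer against all three cyclic patterns is replaced by building a frequency table keyed by (index mod 40, value) in one pass (40 = lcm of the pattern lengths) and deriving each pattern's score from the 40 table entries without rescanning the answers.
import Mathlib
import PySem

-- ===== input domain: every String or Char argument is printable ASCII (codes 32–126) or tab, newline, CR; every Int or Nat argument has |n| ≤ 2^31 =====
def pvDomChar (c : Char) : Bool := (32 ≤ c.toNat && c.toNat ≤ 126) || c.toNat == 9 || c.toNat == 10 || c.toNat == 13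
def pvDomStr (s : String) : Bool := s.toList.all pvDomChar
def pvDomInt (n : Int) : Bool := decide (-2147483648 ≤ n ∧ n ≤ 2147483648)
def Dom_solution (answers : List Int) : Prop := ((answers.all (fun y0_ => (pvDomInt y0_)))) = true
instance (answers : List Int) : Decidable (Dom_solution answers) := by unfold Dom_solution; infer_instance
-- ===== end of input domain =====

-- B replaces A's interleaved three-counter pass by a frequency table keyed by (index mod 40, value)
-- built in one pass; each pattern's score is then read off the 40 table entries (alternative, same cost).

-- ===== PORT A =====
-- one pass over enumerate(answers) updating the three counters together
def solution (answers : List Int) : List Int :=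
  let supo1 : List Int := [1, 2, 3, 4, 5]
  let supo2 : List Int := [2, 1, 2, 3, 2, 4, 2, 5]
  let supo3 : List Int := [3, 3, 1, 1, 2, 2, 4, 4, 5, 5]
  let c :=
    (PySem.List.enumerate answers).foldl
      (fun (c : Int × Int × Int) (p : Int × Int) =>
        let c := if p.2 = supo1.getD (PySem.Int.mod p.1 (Int.ofNat supo1.length)).toNat 0
                 then (c.1 + 1, c.2.1, c.2.2) else c
        let c := if p.2 = supo2.getD (PySem.Int.mod p.1 (Int.ofNat supo2.length)).toNat 0
                 then (c.1, c.2.1 + 1, c.2.2) else c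
        let c := if p.2 = supo3.getD (PySem.Int.mod p.1 (Int.ofNat supo3.length)).toNat 0
                 then (c.1, c.2.1, c.2.2 + 1) else c
        c)
      (0, 0, 0)
  let cnt : List Int := [c.1, c.2.1, c.2.2]
  (PySem.List.enumerate cnt).foldl
    (fun (answer : List Int) (p : Int × Int) =>
      if p.2 = (PySem.List.max? cnt (fun x => x)).getD 0 then answer ++ [p.1 + 1] else answer)
    []

-- ===== PORT B =====
-- freq[(i % 40, a)] += 1 over enumerate(answers); scores read from the table, no rescan of answers
def solution_alt (answers : List Int) : List Int :=
  let freq : PySem.Dict (Int × Int) Int :=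
    (PySem.List.enumerate answers).foldl
      (fun (d : PySem.Dict (Int × Int) Int) (q : Int × Int) =>
        d.insert (PySem.Int.mod q.1 40, q.2) (d.getD (PySem.Int.mod q.1 40, q.2) 0 + 1))
      PySem.Dict.empty
  let patterns : List (List Int) :=
    [[1, 2, 3, 4, 5], [2, 1, 2, 3, 2, 4, 2, 5], [3, 3, 1, 1, 2, 2, 4, 4, 5, 5]]
  let cnt : List Int := patterns.map (fun p =>
    (PySem.List.pyRange 0 40 1).foldl
      (fun (s : Int) (r : Int) =>
        s + freq.getD (r, p.getD (PySem.Int.mod r (Int.ofNat p.length)).toNat 0) 0)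
      0)
  let m : Int := (PySem.List.max? cnt (fun x => x)).getD 0
  (PySem.List.enumerate cnt).filterMap
    (fun (q : Int × Int) => if q.2 = m then some (q.1 + 1) else none)

-- ===== PRECONDITION & SPEC =====
def Spec_solution (answers : List Int) (out : List Int) : Prop := out = solution_alt answers
instance (answers : List Int) (out : List Int) : Decidable (Spec_solution answers out) := by unfold Spec_solution; infer_instance

-- ===== CLAIM (what is proved, stated in full; the proofs are below) =====
def Claim_equal_solution : Prop := ∀ (answers : List Int), Dom_solution answers → Spec_solution answers (solution answers)

-- ===== LEMMAS AND PROOFS =====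

-- recursive match count starting at index i (proof-only reference function)
def pvCntR (p : List Int) (i : Int) : List Int → Int
  | [] => 0
  | a :: t =>
      (if a = p.getD (PySem.Int.mod i (Int.ofNat p.length)).toNat 0 then 1 else 0) +
        pvCntR p (i + 1) t

theorem pvLoopA (xs : List Int) :
    ∀ (i c1 c2 c3 : Int),
      (PySem.List.enumerate xs i).foldl
        (fun (c : Int × Int × Int) (p : Int × Int) =>
          let c := if p.2 = ([1, 2, 3, 4, 5] : List Int).getD
                        (PySem.Int.mod p.1 (Int.ofNat ([1, 2, 3, 4, 5] : List Int).length)).toNat 0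
                   then (c.1 + 1, c.2.1, c.2.2) else c
          let c := if p.2 = ([2, 1, 2, 3, 2, 4, 2, 5] : List Int).getD
                        (PySem.Int.mod p.1 (Int.ofNat ([2, 1, 2, 3, 2, 4, 2, 5] : List Int).length)).toNat 0
                   then (c.1, c.2.1 + 1, c.2.2) else c
          let c := if p.2 = ([3, 3, 1, 1, 2, 2, 4, 4, 5, 5] : List Int).getD
                        (PySem.Int.mod p.1 (Int.ofNat ([3, 3, 1, 1, 2, 2, 4, 4, 5, 5] : List Int).length)).toNat 0
                   then (c.1, c.2.1, c.2.2 + 1) else c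
          c)
        (c1, c2, c3) =
      (c1 + pvCntR [1, 2, 3, 4, 5] i xs,
       c2 + pvCntR [2, 1, 2, 3, 2, 4, 2, 5] i xs,
       c3 + pvCntR [3, 3, 1, 1, 2, 2, 4, 4, 5, 5] i xs) := by
  induction xs with
  | nil => intro i c1 c2 c3; simp [PySem.List.enumerate_nil, pvCntR]
  | cons a t ih =>
      intro i c1 c2 c3
      simp only [PySem.List.enumerate_cons, List.foldl_cons, pvCntR, ih]
      split_ifs <;> simp <;> ring_nf <;> simp

-- foldl-with-accumulating-sum equals sum of a map
theorem pvFoldlAdd (L : List Int) (f : Int → Int) :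
    ∀ (s : Int), L.foldl (fun s r => s + f r) s = s + (L.map f).sum := by
  induction L with
  | nil => intro s; simp
  | cons r t ih => intro s; simp [List.foldl_cons, ih]; ring

-- sum of the indicator [(r, t r) = (k, a)] over L
theorem pvIndSum (k a : Int) (t : Int → Int) (L : List Int) :
    (L.map (fun r => if ((r, t r) : Int × Int) = (k, a) then (1 : Int) else 0)).sum =
      (if t k = a then 1 else 0) * (L.count k : Int) := by
  induction L with
  | nil => simp
  | cons r l ih =>
      by_cases hr : r = k
      · subst hr
        simp only [List.map_cons, List.sum_cons, ih, List.count_cons_self]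
        by_cases ht : t r = a
        · simp [ht]; ring
        · have : ((r, t r) : Int × Int) ≠ (r, a) := by simp [ht]
          simp [this, ht]
      · have : ((r, t r) : Int × Int) ≠ (k, a) := by simp [hr]
        simp only [List.map_cons, List.sum_cons, ih, this, if_false]
        rw [List.count_cons_of_ne (by simpa [eq_comm] using hr)]
        simp

-- each k in [0, 40) occurs exactly once in range(40)
theorem pvCountRange (k : Int) (h0 : 0 ≤ k) (h40 : k < 40) :
    (PySem.List.pyRange 0 40 1).count k = 1 := by
  interval_cases k <;> decide

-- the table-derived score equals the direct match count
theorem pvCountB (p : List Int) (hpos : 0 < (p.length : Int))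
    (hdvd : (p.length : Int) ∣ 40) (xs : List Int) :
    ∀ (i : Int),
      ((PySem.List.pyRange 0 40 1).map
        (fun r =>
          (((PySem.List.enumerate xs i).map
              (fun q => ((PySem.Int.mod q.1 40, q.2) : Int × Int))).count
            (r, p.getD (PySem.Int.mod r (Int.ofNat p.length)).toNat 0) : Int))).sum =
      pvCntR p i xs := by
  induction xs with
  | nil =>
      intro i
      simp [PySem.List.enumerate_nil, pvCntR]
  | cons a t ih =>
      intro i
      have key : ∀ (r : Int),
          ((((PySem.Int.mod i 40, a) : Int × Int) ::
              (PySem.List.enumerate t (i + 1)).map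
                (fun q => ((PySem.Int.mod q.1 40, q.2) : Int × Int))).count
            (r, p.getD (PySem.Int.mod r (Int.ofNat p.length)).toNat 0) : Int) =
          (((PySem.List.enumerate t (i + 1)).map
              (fun q => ((PySem.Int.mod q.1 40, q.2) : Int × Int))).count
            (r, p.getD (PySem.Int.mod r (Int.ofNat p.length)).toNat 0) : Int) +
          (if ((r, p.getD (PySem.Int.mod r (Int.ofNat p.length)).toNat 0) : Int × Int) =
              (PySem.Int.mod i 40, a) then 1 else 0) := by
        intro r
        simp only [List.count_cons, beq_iff_eq]
        push_cast
        by_cases h : ((PySem.Int.mod i 40, a) : Int × Int) =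
            (r, p.getD (PySem.Int.mod r (Int.ofNat p.length)).toNat 0)
        · rw [if_pos h, if_pos h.symm]; try ring
        · rw [if_neg h, if_neg (fun hc => h hc.symm)]; try ring
      simp only [PySem.List.enumerate_cons, List.map_cons, key, List.sum_map_add]
      rw [ih, pvIndSum (PySem.Int.mod i 40) a
            (fun r => p.getD (PySem.Int.mod r (Int.ofNat p.length)).toNat 0)]
      have hm : PySem.Int.mod i 40 = i % 40 := PySem.Int.mod_eq_emod_of_pos (by omega)
      have h0 : 0 ≤ PySem.Int.mod i 40 := by rw [hm]; exact Int.emod_nonneg i (by omega)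
      have h40 : PySem.Int.mod i 40 < 40 := by rw [hm]; exact Int.emod_lt_of_pos i (by omega)
      rw [pvCountRange _ h0 h40]
      have hmm : PySem.Int.mod (PySem.Int.mod i 40) (Int.ofNat p.length) =
          PySem.Int.mod i (Int.ofNat p.length) := by
        rw [hm, PySem.Int.mod_eq_emod_of_pos (by simpa using hpos),
            PySem.Int.mod_eq_emod_of_pos (by simpa using hpos)]
        exact Int.emod_emod_of_dvd i (by simpa using hdvd)
      simp only [hmm, pvCntR, Nat.cast_one, mul_one]
      split_ifs <;> simp_all
      ring

-- the two second phases agree on any 3-element count list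
theorem pvPhase2 (n1 n2 n3 : Int) :
    (PySem.List.enumerate ([n1, n2, n3] : List Int)).foldl
      (fun (answer : List Int) (p : Int × Int) =>
        if p.2 = (PySem.List.max? ([n1, n2, n3] : List Int) (fun x => x)).getD 0
        then answer ++ [p.1 + 1] else answer)
      [] =
    (PySem.List.enumerate ([n1, n2, n3] : List Int)).filterMap
      (fun (q : Int × Int) =>
        if q.2 = (PySem.List.max? ([n1, n2, n3] : List Int) (fun x => x)).getD 0
        then some (q.1 + 1) else none) := by
  simp only [PySem.List.enumerate_cons, PySem.List.enumerate_nil, List.foldl, List.filterMap]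
  split_ifs <;> simp

-- B's score for pattern p, rewritten: counter lookup = list count, foldl = sum of map
theorem pvScoreB (p : List Int) (answers : List Int) :
    (PySem.List.pyRange 0 40 1).foldl
      (fun (s : Int) (r : Int) =>
        s + ((PySem.List.enumerate answers).foldl
              (fun (d : PySem.Dict (Int × Int) Int) (q : Int × Int) =>
                d.insert (PySem.Int.mod q.1 40, q.2)
                  (d.getD (PySem.Int.mod q.1 40, q.2) 0 + 1))
              PySem.Dict.empty).getD
            (r, p.getD (PySem.Int.mod r (Int.ofNat p.length)).toNat 0) 0)
      0 =
    ((PySem.List.pyRange 0 40 1).map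
      (fun r =>
        (((PySem.List.enumerate answers).map
            (fun q => ((PySem.Int.mod q.1 40, q.2) : Int × Int))).count
          (r, p.getD (PySem.Int.mod r (Int.ofNat p.length)).toNat 0) : Int))).sum := by
  have hc : (PySem.List.enumerate answers).foldl
      (fun (d : PySem.Dict (Int × Int) Int) (q : Int × Int) =>
        d.insert (PySem.Int.mod q.1 40, q.2) (d.getD (PySem.Int.mod q.1 40, q.2) 0 + 1))
      PySem.Dict.empty =
      PySem.Dict.counter ((PySem.List.enumerate answers).map
        (fun q => ((PySem.Int.mod q.1 40, q.2) : Int × Int))) := by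
    rw [← PySem.Dict.foldl_insert_getD_add_one_eq_counter, List.foldl_map]
  rw [hc, pvFoldlAdd]
  simp [PySem.Dict.getD_counter]

-- ===== VERDICT (by name: the statement is the Claim_ definition above) =====
theorem solution_spec : Claim_equal_solution := by
  intro answers _
  unfold Spec_solution solution solution_alt
  simp only [List.map_cons, List.map_nil, pvScoreB]
  rw [pvCountB [1, 2, 3, 4, 5] (by norm_num) (by norm_num) answers,
      pvCountB [2, 1, 2, 3, 2, 4, 2, 5] (by norm_num) (by norm_num) answers,
      pvCountB [3, 3, 1, 1, 2, 2, 4, 4, 5, 5] (by norm_num) (by norm_num) answers,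
      pvLoopA]
  simp only [Int.zero_add]
  exact pvPhase2 _ _ _
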